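-- pv_equiv track=rewrite | github.com/daniel-reich/turbo-robot | v2eHXTn2qobw2WYJP_20.py | minesweeper_numbers
-- ===== SOURCE A (Python) =====
-- def minesweeper_numbers(lst):
--   A=[[0 for j in range(len(lst[0]))] for i in range(len(lst))]
--   for i in range(len(lst)):
--     for j in range(len(lst[0])):
--       if lst[i][j]==1:
--         A[i][j]=9
--       else:
--         A[i][j]=[lst[k][t] for k in range(len(lst)) for t in range(len(lst[0])) if abs(i-k)<2 and abs(j-t)<2].count(1)
--   return A
-- ===== SOURCE B (Python) =====
-- def minesweeper_numbers(lst):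
--   n, m = len(lst), len(lst[0])
--   out = []
--   for i in range(n):
--     row = []
--     for j in range(m):
--       if lst[i][j] == 1:
--         row.append(9)
--       else:
--         c = 0
--         for di, dj in ((-1, -1), (-1, 0), (-1, 1), (0, -1), (0, 1), (1, -1), (1, 0), (1, 1)):
--           k, t = i + di, j + dj
--           if 0 <= k < n and 0 <= t < m and lst[k][t] == 1:
--             c += 1
--         row.append(c)
--     out.append(row)
--   return out
-- ===== Notes on version B (the rewrite author's own statement) =====
-- stated objective: faster
-- what changed: Instead of rebuilding and scanning the whole grid for every cell, B examines only the 8 adjacent offsets of each cell, turning O(n*m) work per cell into O(1).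
-- outside the precondition, e.g. on minesweeper_numbers([]): A returns [], B raises IndexError
import Mathlib
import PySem

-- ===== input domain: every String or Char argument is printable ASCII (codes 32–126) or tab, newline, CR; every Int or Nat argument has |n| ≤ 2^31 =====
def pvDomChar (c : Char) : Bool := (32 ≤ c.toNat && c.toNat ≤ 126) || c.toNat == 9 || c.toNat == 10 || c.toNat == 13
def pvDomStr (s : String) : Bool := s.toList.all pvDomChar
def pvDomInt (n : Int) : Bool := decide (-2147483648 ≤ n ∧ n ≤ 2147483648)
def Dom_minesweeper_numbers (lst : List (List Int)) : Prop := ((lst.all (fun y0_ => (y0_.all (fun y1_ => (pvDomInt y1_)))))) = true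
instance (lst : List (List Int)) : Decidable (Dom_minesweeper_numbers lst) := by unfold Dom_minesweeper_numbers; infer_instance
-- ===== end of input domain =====

-- B replaces A's per-cell rescan of the whole grid by a check of only the 8 adjacent cells (objective: faster).


-- shared indexing helper: lst[k][t] (indices are in range on Pre_, default never used there)
def pvCell (lst : List (List Int)) (k t : Int) : Int :=
  PySem.List.pyGetD (PySem.List.pyGetD lst k []) t 0

-- ===== PORT A =====
def minesweeper_numbers (lst : List (List Int)) : List (List Int) :=
  let n : Int := lst.length
  let m : Int := ((lst.headD []).length : Int)
  (PySem.List.pyRange 0 n 1).map (fun i =>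
    (PySem.List.pyRange 0 m 1).map (fun j =>
      if pvCell lst i j = 1 then 9
      else (((PySem.List.pyRange 0 n 1).flatMap (fun k =>
        (PySem.List.pyRange 0 m 1).filterMap (fun t =>
          if |i - k| < 2 ∧ |j - t| < 2 then some (pvCell lst k t) else none))).count 1 : Int)))

-- ===== PORT B =====
def pvOffsets : List (Int × Int) :=
  [(-1, -1), (-1, 0), (-1, 1), (0, -1), (0, 1), (1, -1), (1, 0), (1, 1)]

def minesweeper_numbers_alt (lst : List (List Int)) : List (List Int) :=
  let n : Int := lst.length
  let m : Int := ((lst.headD []).length : Int)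
  (PySem.List.pyRange 0 n 1).map (fun i =>
    (PySem.List.pyRange 0 m 1).map (fun j =>
      if pvCell lst i j = 1 then 9
      else pvOffsets.foldl (fun c d =>
        if 0 ≤ i + d.1 ∧ i + d.1 < n ∧ 0 ≤ j + d.2 ∧ j + d.2 < m ∧ pvCell lst (i + d.1) (j + d.2) = 1
        then c + 1 else c) 0))

-- ===== PRECONDITION & SPEC =====
-- Pre_ excludes grids with a row shorter than the first row, on which A raises IndexError, and the
-- empty grid, on which A returns [] only because its inner comprehension is never evaluated while
-- B's len(lst[0]) raises IndexError there.
def Pre_minesweeper_numbers (lst : List (List Int)) : Prop :=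
  lst ≠ [] ∧ ∀ row ∈ lst, (lst.headD []).length ≤ row.length
instance (lst : List (List Int)) : Decidable (Pre_minesweeper_numbers lst) := by
  unfold Pre_minesweeper_numbers; infer_instance

def pvWitness_minesweeper_numbers : List (List Int) := [[1, 0], [0, 0]]

def Spec_minesweeper_numbers (lst : List (List Int)) (out : List (List Int)) : Prop := out = minesweeper_numbers_alt lst
instance (lst : List (List Int)) (out : List (List Int)) : Decidable (Spec_minesweeper_numbers lst out) := by unfold Spec_minesweeper_numbers; infer_instance

-- ===== CLAIM (what is proved, stated in full; the proofs are below) =====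
def Claim_equal_minesweeper_numbers : Prop := ∀ (lst : List (List Int)), Dom_minesweeper_numbers lst → Pre_minesweeper_numbers lst → Spec_minesweeper_numbers lst (minesweeper_numbers lst)

-- ===== LEMMAS AND PROOFS =====

lemma pv_count_filterMap (c : Int → Int) (p : Int → Prop) [DecidablePred p] (L : List Int) :
    (L.filterMap (fun t => if p t then some (c t) else none)).count 1
      = (L.map (fun t => if p t ∧ c t = 1 then 1 else 0)).sum := by
  induction L with
  | nil => simp
  | cons a L ih =>
    by_cases hp : p a
    · by_cases hc : c a = 1 <;>
        simp [hp, hc, ih, Nat.add_comm]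
    · simp [hp, ih]

lemma pv_count_flatMap (f : Int → List Int) (L : List Int) (v : Int) :
    (L.flatMap f).count v = (L.map (fun k => (f k).count v)).sum := by
  induction L <;> simp [List.count_append, *]

lemma pv_sum_map_add (f g : Int → Nat) (L : List Int) :
    (L.map (fun k => f k + g k)).sum = (L.map f).sum + (L.map g).sum := by
  induction L with
  | nil => simp
  | cons a L ih => simp [ih]; omega

lemma pv_sum_single (g : Int → Nat) (s : Int) (L : List Int) (hL : L.Nodup) :
    (L.map (fun k => if k = s then g k else 0)).sum = if s ∈ L then g s else 0 := by
  induction L with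
  | nil => simp
  | cons a L ih =>
    rcases List.nodup_cons.mp hL with ⟨ha, hL'⟩
    by_cases h : a = s
    · have hs : s ∉ L := h ▸ ha
      simp [h, ih hL', hs]
    · simp [h, ih hL', List.mem_cons, Ne.symm h]

lemma pv_sum_swap (g : Int → Nat) (L S : List Int) (hL : L.Nodup) (hS : S.Nodup) :
    (L.map (fun k => if k ∈ S then g k else 0)).sum
      = (S.map (fun s => if s ∈ L then g s else 0)).sum := by
  induction S with
  | nil => simp
  | cons a S ih =>
    rcases List.nodup_cons.mp hS with ⟨ha, hS'⟩
    have hfun : ∀ k ∈ L, (if k ∈ a :: S then g k else 0)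
        = (if k = a then g k else 0) + (if k ∈ S then g k else 0) := by
      intro k _
      by_cases h1 : k = a
      · simp [h1, List.mem_cons, ha]
      · by_cases h2 : k ∈ S <;> simp [h1, h2, List.mem_cons]
    rw [List.map_congr_left hfun, pv_sum_map_add, pv_sum_single g a L hL, ih hS']
    simp

lemma pv_sum_count (g : Int → Nat) (P : Int → Prop) [DecidablePred P] (L S : List Int)
    (hL : L.Nodup) (hS : S.Nodup) (hPS : ∀ x, P x ↔ x ∈ S) :
    (L.map (fun k => if P k then g k else 0)).sum
      = (S.map (fun s => if s ∈ L then g s else 0)).sum := by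
  rw [List.map_congr_left (fun k _ => if_congr (hPS k) rfl rfl)]
  exact pv_sum_swap g L S hL hS

lemma pv_line (b x : Int) (g : Int → Nat) :
    ((PySem.List.pyRange 0 b 1).map (fun t => if |x - t| < 2 then g t else 0)).sum
      = (if 0 ≤ x - 1 ∧ x - 1 < b then g (x - 1) else 0)
        + ((if 0 ≤ x ∧ x < b then g x else 0)
        + ((if 0 ≤ x + 1 ∧ x + 1 < b then g (x + 1) else 0) + 0)) := by
  have hS : ([x - 1, x, x + 1] : List Int).Nodup := by
    refine List.nodup_cons.mpr ⟨?_, List.nodup_cons.mpr ⟨?_, ?_⟩⟩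
    · simp only [List.mem_cons, List.not_mem_nil, or_false, not_or]
      omega
    · simp only [List.mem_cons, List.not_mem_nil, or_false]
      omega
    · simp
  have hPS : ∀ t : Int, |x - t| < 2 ↔ t ∈ ([x - 1, x, x + 1] : List Int) := by
    intro t
    rw [abs_lt]
    simp only [List.mem_cons, List.not_mem_nil, or_false]
    omega
  rw [pv_sum_count g _ _ _ (PySem.List.nodup_pyRange_one 0 b) hS hPS]
  simp only [List.map_cons, List.map_nil, List.sum_cons, List.sum_nil,
    PySem.List.mem_pyRange_one]

lemma pv_ite_add (P : Prop) [Decidable P] (a b : Nat) :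
    (if P then a + b else 0) = (if P then a else 0) + (if P then b else 0) := by
  by_cases h : P <;> simp [h]

lemma pv_key (n m i j : Int) (c : Int → Int → Int) (hc : ¬ c i j = 1) :
    ((((PySem.List.pyRange 0 n 1).flatMap (fun k =>
        (PySem.List.pyRange 0 m 1).filterMap (fun t =>
          if |i - k| < 2 ∧ |j - t| < 2 then some (c k t) else none))).count 1 : Nat) : Int)
      = pvOffsets.foldl (fun acc d =>
          if 0 ≤ i + d.1 ∧ i + d.1 < n ∧ 0 ≤ j + d.2 ∧ j + d.2 < m ∧ c (i + d.1) (j + d.2) = 1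
          then acc + 1 else acc) 0 := by
  rw [pv_count_flatMap, PySem.List.foldl_ite_add_one]
  have step1 : ∀ k ∈ PySem.List.pyRange 0 n 1,
      ((PySem.List.pyRange 0 m 1).filterMap (fun t =>
          if |i - k| < 2 ∧ |j - t| < 2 then some (c k t) else none)).count 1
        = (if |i - k| < 2 then
            ((PySem.List.pyRange 0 m 1).map
              (fun t => if |j - t| < 2 then (if c k t = 1 then 1 else 0) else 0)).sum
          else 0) := by
    intro k _
    rw [pv_count_filterMap]
    by_cases hk : |i - k| < 2
    · simp only [hk, if_true, true_and, ite_and]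
    · simp [hk]
  rw [List.map_congr_left step1, pv_line n i, pv_line m j, pv_line m j, pv_line m j]
  simp only [pvOffsets, List.countP_cons, List.countP_nil, decide_eq_true_eq, zero_add]
  simp only [add_zero, ← sub_eq_add_neg]
  simp only [pv_ite_add, ← ite_and, and_assoc]
  simp only [hc, and_false, if_false]
  push_cast
  ring

-- ===== VERDICT (by name: the statement is the Claim_ definition above) =====
theorem minesweeper_numbers_spec : Claim_equal_minesweeper_numbers := by
  intro lst _ _
  unfold Spec_minesweeper_numbers minesweeper_numbers minesweeper_numbers_alt
  apply List.map_congr_left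
  intro i _
  apply List.map_congr_left
  intro j _
  by_cases h : pvCell lst i j = 1
  · simp [h]
  · rw [if_neg h, if_neg h]
    exact pv_key _ _ i j (pvCell lst) h
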